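-- pv_equiv track=rewrite | github.com/dickhfchan/borocol | server/utils.py | keys_match
-- ===== SOURCE A (Python) =====
-- def keys_match(dc, keys):
--     keys = keys[:]
--     for k, v in dc.items():
--         if k not in keys:
--             return False
--         else:
--             keys.remove(k)
--     return len(keys) == 0
-- ===== SOURCE B (Python) =====
-- def keys_match(dc, keys):
--     # multiset equality of the dict's keys and the key list, by sort-then-compare
--     return sorted(dc) == sorted(keys)
-- ===== Notes on version B (the rewrite author's own statement) =====
-- stated objective: simpler
-- what changed: Replaces the scan-and-remove loop (a membership scan plus a list.remove scan per dict key) with a single sort-then-compare of the two key sequences (multiset equality).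
import Mathlib
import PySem

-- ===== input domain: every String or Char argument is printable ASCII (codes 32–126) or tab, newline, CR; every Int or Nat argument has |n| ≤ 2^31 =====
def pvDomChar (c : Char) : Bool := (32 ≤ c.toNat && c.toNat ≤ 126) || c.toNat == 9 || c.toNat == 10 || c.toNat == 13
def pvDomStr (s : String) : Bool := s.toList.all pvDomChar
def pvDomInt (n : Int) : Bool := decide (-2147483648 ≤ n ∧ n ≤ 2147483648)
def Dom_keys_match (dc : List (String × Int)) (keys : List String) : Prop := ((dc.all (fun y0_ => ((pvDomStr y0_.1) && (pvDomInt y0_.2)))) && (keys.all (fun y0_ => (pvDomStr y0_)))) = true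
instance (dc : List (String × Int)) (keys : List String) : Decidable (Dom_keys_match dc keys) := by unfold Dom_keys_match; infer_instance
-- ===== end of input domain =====

-- B replaces A's scan-and-remove loop by sorting both key sequences and comparing them (multiset equality); simpler, no mutation.

-- ===== PORT A =====
-- the 'for k, v in dc.items()' loop: early return False when k missing, else keys.remove(k);
-- keys.remove(k) under the established membership is exactly List.erase (PySem.List.remove?_eq_some_erase)
def keysMatchLoop : List (String × Int) → List String → Bool
  | [], keys => keys.length == 0                 -- return len(keys) == 0
  | (k, _) :: rest, keys =>
    if k ∈ keys then keysMatchLoop rest (keys.erase k)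
    else false

def keys_match (dc : List (String × Int)) (keys : List String) : Bool :=
  keysMatchLoop dc keys                          -- keys[:] copies the list; values are immutable here

-- ===== PORT B =====
-- sorted(dc) iterates the dict's keys; sorted(xs) is PySem.List.sorted with the identity key
def keys_match_alt (dc : List (String × Int)) (keys : List String) : Bool :=
  PySem.List.sorted (dc.map Prod.fst) (fun x => x) == PySem.List.sorted keys (fun x => x)

-- ===== PRECONDITION & SPEC =====
def Spec_keys_match (dc : List (String × Int)) (keys : List String) (out : Bool) : Prop := out = keys_match_alt dc keys
instance (dc : List (String × Int)) (keys : List String) (out : Bool) : Decidable (Spec_keys_match dc keys out) := by unfold Spec_keys_match; infer_instance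

-- ===== CLAIM (what is proved, stated in full; the proofs are below) =====
def Claim_equal_keys_match : Prop := ∀ (dc : List (String × Int)) (keys : List String), Dom_keys_match dc keys → Spec_keys_match dc keys (keys_match dc keys)

-- ===== LEMMAS AND PROOFS =====

-- A's loop succeeds exactly when the dict's key list is a permutation (multiset equal) of keys
theorem keysMatchLoop_iff_perm (items : List (String × Int)) (keys : List String) :
    keysMatchLoop items keys = true ↔ (items.map Prod.fst).Perm keys := by
  induction items generalizing keys with
  | nil =>
    simp [keysMatchLoop, List.nil_perm, List.length_eq_zero_iff]
  | cons p rest ih =>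
    obtain ⟨k, v⟩ := p
    by_cases hk : k ∈ keys
    · simp [keysMatchLoop, hk, ih, List.cons_perm_iff_perm_erase]
    · simp [keysMatchLoop, hk, List.cons_perm_iff_perm_erase]

-- ===== VERDICT (by name: the statement is the Claim_ definition above) =====
theorem keys_match_spec : Claim_equal_keys_match := by
  intro dc keys _
  unfold Spec_keys_match keys_match keys_match_alt
  rw [Bool.eq_iff_iff, keysMatchLoop_iff_perm, beq_iff_eq,
    PySem.List.sorted_id_eq_sorted_id_iff_perm]
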